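-- pv_equiv track=rewrite | github.com/ericu9500/PapyriAndInscriptions | train_data/.ipynb_checkpoints/08_prepare_test_text-checkpoint.py | reassemble_text_with_placeholder
-- ===== SOURCE A (Python) =====
-- def reassemble_text_with_placeholder(grouped_sequences):
--     reassembled_text = ""
--     placeholder_inserted = False
--
--     for count, token_type, tokens in grouped_sequences:
--         for token in tokens:
--             if token == "X" and not placeholder_inserted:
--                 # Count the number of Xs in this segment
--                 masked_count = tokens.count("X")
--                 reassembled_text += f"[{masked_count} letters missing]"
--                 placeholder_inserted = True
--             elif token != "X":
--                 reassembled_text += token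
--
--     return reassembled_text
-- ===== SOURCE B (Python) =====
-- def reassemble_text_with_placeholder(grouped_sequences):
--     seg_lists = [tokens for _count, _token_type, tokens in grouped_sequences]
--     return _assemble(seg_lists)
--
--
-- def _assemble(seg_lists):
--     # recurse over segments; at the first segment containing "X", split it at
--     # tokens.index("X"), emit the placeholder there, and finish with a pure
--     # X-dropping pass over everything that remains
--     if not seg_lists:
--         return ""
--     tokens, rest = seg_lists[0], seg_lists[1:]
--     if "X" in tokens:
--         j = tokens.index("X")
--         placeholder = "[%d letters missing]" % tokens.count("X")
--         return ("".join(tokens[:j]) + placeholder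
--                 + "".join(t for t in tokens[j:] if t != "X")
--                 + _drop_masks(rest))
--     return "".join(tokens) + _assemble(rest)
--
--
-- def _drop_masks(seg_lists):
--     return "".join(t for ts in seg_lists for t in ts if t != "X")
-- ===== Notes on version B (the rewrite author's own statement) =====
-- stated objective: alternative
-- what changed: A makes one stateful pass with a running string and an inserted-flag; B is recursive over the segments: it locates the first segment containing 'X', splits that segment at tokens.index('X') into slices joined around the placeholder, and handles everything after it with a separate stateless X-dropping join, so no flag or running accumulator exists.
import Mathlib
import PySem

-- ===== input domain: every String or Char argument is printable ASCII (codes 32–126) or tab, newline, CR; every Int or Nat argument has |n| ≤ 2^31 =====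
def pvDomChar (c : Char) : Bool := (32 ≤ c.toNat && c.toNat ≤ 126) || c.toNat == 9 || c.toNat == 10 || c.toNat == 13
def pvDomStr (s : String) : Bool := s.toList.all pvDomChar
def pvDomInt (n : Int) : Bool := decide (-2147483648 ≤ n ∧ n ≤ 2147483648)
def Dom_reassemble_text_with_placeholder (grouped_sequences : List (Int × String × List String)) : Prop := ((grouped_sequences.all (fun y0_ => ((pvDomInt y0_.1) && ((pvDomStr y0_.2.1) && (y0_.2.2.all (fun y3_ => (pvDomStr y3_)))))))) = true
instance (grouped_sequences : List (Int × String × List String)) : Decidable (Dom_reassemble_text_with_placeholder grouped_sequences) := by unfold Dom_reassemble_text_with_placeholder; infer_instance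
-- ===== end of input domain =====

-- B replaces A's single stateful pass (running string + inserted-flag) by a
-- recursion over the segments that splits the first X-bearing segment at
-- tokens.index("X") and joins slices around the placeholder; objective: alternative.

-- ===== PORT A =====
-- one step of A's inner loop: running text + placeholder_inserted flag
def stepA (tokens : List String) (st : String × Bool) (token : String) : String × Bool :=
  if token == "X" && !st.2 then
    (st.1 ++ "[" ++ PySem.Int.toStr (PySem.List.count tokens "X" : Int) ++ " letters missing]", true)
  else if token != "X" then
    (st.1 ++ token, st.2)
  else
    st

def reassemble_text_with_placeholder (grouped_sequences : List (Int × String × List String)) : String :=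
  (grouped_sequences.foldl
    (fun (st : String × Bool) g => g.2.2.foldl (stepA g.2.2) st)
    ("", false)).1

-- ===== PORT B =====
-- ''.join(l) ported by hand as a left fold of string concatenation (exact: joining with the empty separator is plain concatenation)
def joinAll (l : List String) : String := l.foldl (· ++ ·) ""

-- _drop_masks: join of every non-"X" token of the remaining segments
def dropMasks (seg_lists : List (List String)) : String :=
  joinAll ((seg_lists.flatMap (fun ts => ts)).filter (fun t => t ≠ "X"))

-- _assemble: recursion over the segment lists
def assembleB : List (List String) → String
  | [] => ""
  | tokens :: rest =>
    if tokens.contains "X" then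
      match PySem.List.index? tokens "X" with
      | some j =>
          joinAll (PySem.List.slice tokens none (some (j : Int)))
            ++ ("[" ++ PySem.Int.toStr (PySem.List.count tokens "X" : Int) ++ " letters missing]")
            ++ joinAll ((PySem.List.slice tokens (some (j : Int)) none).filter (fun t => t ≠ "X"))
            ++ dropMasks rest
      | none => ""   -- unreachable: membership guarantees index? = some
    else joinAll tokens ++ assembleB rest

def reassemble_text_with_placeholder_alt (grouped_sequences : List (Int × String × List String)) : String :=
  assembleB (grouped_sequences.map (fun g => g.2.2))

-- ===== PRECONDITION & SPEC =====
def Spec_reassemble_text_with_placeholder (grouped_sequences : List (Int × String × List String)) (out : String) : Prop := out = reassemble_text_with_placeholder_alt grouped_sequences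
instance (grouped_sequences : List (Int × String × List String)) (out : String) : Decidable (Spec_reassemble_text_with_placeholder grouped_sequences out) := by unfold Spec_reassemble_text_with_placeholder; infer_instance

-- ===== CLAIM (what is proved, stated in full; the proofs are below) =====
def Claim_equal_reassemble_text_with_placeholder : Prop := ∀ (grouped_sequences : List (Int × String × List String)), Dom_reassemble_text_with_placeholder grouped_sequences → Spec_reassemble_text_with_placeholder grouped_sequences (reassemble_text_with_placeholder grouped_sequences)

-- ===== LEMMAS AND PROOFS =====

theorem joinAll_from (l : List String) (s : String) :
    l.foldl (· ++ ·) s = s ++ joinAll l := by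
  induction l generalizing s with
  | nil => simp [joinAll]
  | cons x xs ih =>
    have h1 : joinAll (x :: xs) = x ++ joinAll xs := by
      show List.foldl (· ++ ·) ("" ++ x) xs = _
      rw [ih ("" ++ x)]; simp
    rw [List.foldl_cons, ih (s ++ x), h1, String.append_assoc]

theorem joinAll_cons (x : String) (l : List String) : joinAll (x :: l) = x ++ joinAll l := by
  show List.foldl (· ++ ·) ("" ++ x) l = _
  rw [joinAll_from]; simp

theorem joinAll_append (a b : List String) : joinAll (a ++ b) = joinAll a ++ joinAll b := by
  show (a ++ b).foldl (· ++ ·) "" = _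
  rw [List.foldl_append, joinAll_from]; rfl

-- the placeholder text for a segment
def phOf (tokens : List String) : String :=
  "[" ++ PySem.Int.toStr (PySem.List.count tokens "X" : Int) ++ " letters missing]"

-- A's inner loop with the flag already true just appends the non-X tokens
theorem foldA_true (full : List String) (tokens : List String) (s : String) :
    tokens.foldl (stepA full) (s, true) = (s ++ joinAll (tokens.filter (fun t => t ≠ "X")), true) := by
  induction tokens generalizing s with
  | nil => simp [joinAll]
  | cons t ts ih =>
    by_cases h : t = "X"
    · have hstep : stepA full (s, true) t = (s, true) := by simp [stepA, h]
      rw [List.foldl_cons, hstep, ih s, List.filter_cons]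
      simp [h]
    · have hstep : stepA full (s, true) t = (s ++ t, true) := by simp [stepA, h]
      rw [List.foldl_cons, hstep, ih (s ++ t), List.filter_cons]
      simp [h, joinAll_cons, String.append_assoc]

-- A's inner loop over a segment with no X keeps the flag false and appends everything
theorem foldA_noX (full : List String) (tokens : List String) (s : String)
    (h : "X" ∉ tokens) :
    tokens.foldl (stepA full) (s, false) = (s ++ joinAll tokens, false) := by
  induction tokens generalizing s with
  | nil => simp [joinAll]
  | cons t ts ih =>
    have ht : t ≠ "X" := fun e => h (e ▸ List.mem_cons_self)
    have hts : "X" ∉ ts := fun m => h (List.mem_cons_of_mem _ m)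
    have hstep : stepA full (s, false) t = (s ++ t, false) := by simp [stepA, ht]
    rw [List.foldl_cons, hstep, ih (s ++ t) hts, joinAll_cons, String.append_assoc]

-- A's inner loop over a segment whose first X splits it as pre ++ "X" :: post
theorem foldA_split (full pre post : List String) (s : String) (h : "X" ∉ pre) :
    (pre ++ "X" :: post).foldl (stepA full) (s, false)
      = (s ++ joinAll pre ++ phOf full ++ joinAll (post.filter (fun t => t ≠ "X")), true) := by
  rw [List.foldl_append, foldA_noX full pre s h, List.foldl_cons]
  have : stepA full (s ++ joinAll pre, false) "X"
      = (s ++ joinAll pre ++ phOf full, true) := by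
    simp [stepA, phOf, String.append_assoc]
  rw [this, foldA_true]

-- the outer fold of A over the whole list
def foldA (gs : List (Int × String × List String)) (st : String × Bool) : String × Bool :=
  gs.foldl (fun (st : String × Bool) g => g.2.2.foldl (stepA g.2.2) st) st

theorem dropMasks_cons (ts : List String) (segs : List (List String)) :
    dropMasks (ts :: segs) = joinAll (ts.filter (fun t => t ≠ "X")) ++ dropMasks segs := by
  simp [dropMasks, List.flatMap_cons, List.filter_append, joinAll_append]

-- once the flag is true, A just drops the X's of everything that remains
theorem foldA_outer_true (gs : List (Int × String × List String)) (s : String) :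
    foldA gs (s, true) = (s ++ dropMasks (gs.map (fun g => g.2.2)), true) := by
  induction gs generalizing s with
  | nil => simp [foldA, dropMasks, joinAll]
  | cons g rest ih =>
    rw [foldA, List.foldl_cons, foldA_true]
    have := ih (s ++ joinAll (g.2.2.filter (fun t => t ≠ "X")))
    rw [foldA] at this
    rw [this, List.map_cons, dropMasks_cons, String.append_assoc]

-- main correspondence: A's fold from flag-false computes B's recursion
theorem foldA_outer_false (gs : List (Int × String × List String)) (s : String) :
    (foldA gs (s, false)).1 = s ++ assembleB (gs.map (fun g => g.2.2)) := by
  induction gs generalizing s with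
  | nil => simp [foldA, assembleB]
  | cons g rest ih =>
    by_cases hx : "X" ∈ g.2.2
    · obtain ⟨j, hj⟩ := Option.isSome_iff_exists.1
        ((PySem.List.index?_isSome_iff (xs := g.2.2) (v := "X")).mpr hx)
      -- decompose the segment at its first X
      obtain ⟨pre, post, hsplit, hlen, hpre⟩ := (PySem.List.index?_eq_some_iff g.2.2 "X" j).1 hj
      rw [foldA, List.foldl_cons, hsplit, foldA_split _ _ _ _ hpre]
      have h2 := foldA_outer_true rest
        (s ++ joinAll pre ++ phOf (pre ++ "X" :: post) ++ joinAll (post.filter (fun t => t ≠ "X")))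
      rw [foldA] at h2
      rw [h2]
      have hcontains : (g.2.2).contains "X" = true := List.contains_iff_mem.2 hx
      rw [List.map_cons, assembleB]
      simp only [hcontains, if_pos, hj]
      rw [hsplit] at hj ⊢
      rw [PySem.List.slice_to_natCast, PySem.List.slice_from_natCast, ← hlen,
        List.take_left, List.drop_left]
      have hfX : ("X" :: post).filter (fun t => t ≠ "X") = post.filter (fun t => t ≠ "X") := by
        simp
      rw [hfX, phOf]
      simp [String.append_assoc]
    · have hcontains : (g.2.2).contains "X" = false := by
        simp [hx]
      rw [foldA, List.foldl_cons, foldA_noX _ _ _ hx]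
      have := ih (s ++ joinAll g.2.2)
      rw [foldA] at this
      rw [this, List.map_cons, assembleB, hcontains]
      simp [String.append_assoc]

-- ===== VERDICT (by name: the statement is the Claim_ definition above) =====
theorem reassemble_text_with_placeholder_spec : Claim_equal_reassemble_text_with_placeholder := by
  intro gs _
  show reassemble_text_with_placeholder gs = reassemble_text_with_placeholder_alt gs
  have := foldA_outer_false gs ""
  rw [foldA] at this
  simp only [reassemble_text_with_placeholder, reassemble_text_with_placeholder_alt]
  rw [this]
  simp
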